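-- pv_equiv track=rewrite | github.com/Farmer15/algorithm | 프로그래머스/0/120847. 최댓값 만들기 （1）/최댓값 만들기 （1）.py | solution
-- ===== SOURCE A (Python) =====
-- def solution(numbers):
--     max_number = 0
--
--     for number in numbers:
--         if number >= max_number:
--             max_number = number
--
--     next_number = 0
--     count = 1
--
--     for number in numbers:
--         if number == max_number and count == 1:
--             count -= 1
--             continue
--
--         if number >= next_number:
--             next_number = number
--
--     return max_number * next_number
-- ===== SOURCE B (Python) =====
-- def solution(numbers):
--     s = sorted(numbers, reverse=True)
--     a = max(0, s[0]) if s else 0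
--     b = max(0, s[1]) if len(s) >= 2 else 0
--     return a * b
-- ===== Notes on version B (the rewrite author's own statement) =====
-- stated objective: alternative
-- what changed: Replaces A's two linear max-scans (with a skip-one-copy-of-the-max second pass) by a single descending sort and reading the two leading elements, clamped at 0 as the task's zero baseline.
import Mathlib
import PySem

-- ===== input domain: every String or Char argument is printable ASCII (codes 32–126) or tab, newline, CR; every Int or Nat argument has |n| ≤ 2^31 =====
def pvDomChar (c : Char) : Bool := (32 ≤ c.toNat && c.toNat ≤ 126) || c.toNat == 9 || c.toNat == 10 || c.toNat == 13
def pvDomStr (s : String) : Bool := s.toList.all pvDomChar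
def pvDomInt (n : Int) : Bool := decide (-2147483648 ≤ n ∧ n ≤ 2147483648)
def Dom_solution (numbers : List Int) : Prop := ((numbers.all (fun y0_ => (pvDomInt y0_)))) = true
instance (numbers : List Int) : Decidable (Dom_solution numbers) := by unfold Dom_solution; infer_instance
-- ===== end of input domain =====

-- B replaces A's two linear max-scans (the second skipping one copy of the max) by one
-- descending sort and reading the first two elements, clamped at the task's 0 baseline.


-- ===== PORT A =====
-- first loop: max_number
def solnFold1 (numbers : List Int) : Int :=
  numbers.foldl (fun max_number number =>
    if number ≥ max_number then number else max_number) 0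

-- second loop: (next_number, count)
def solnFold2 (m : Int) (numbers : List Int) : Int × Int :=
  numbers.foldl (fun st number =>
    if number = m ∧ st.2 = 1 then (st.1, st.2 - 1)
    else if number ≥ st.1 then (number, st.2)
    else st) ((0 : Int), (1 : Int))

def solution (numbers : List Int) : Int :=
  let max_number := solnFold1 numbers
  let st := solnFold2 max_number numbers
  max_number * st.1

-- ===== PORT B =====
def solution_alt (numbers : List Int) : Int :=
  let s := PySem.List.sorted numbers (fun x => x) true
  let a : Int := match s with | [] => 0 | x :: _ => max 0 x
  let b : Int := match s with | _ :: y :: _ => max 0 y | _ => 0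
  a * b

-- ===== PRECONDITION & SPEC =====
def Spec_solution (numbers : List Int) (out : Int) : Prop := out = solution_alt numbers
instance (numbers : List Int) (out : Int) : Decidable (Spec_solution numbers out) := by unfold Spec_solution; infer_instance

-- ===== CLAIM (what is proved, stated in full; the proofs are below) =====
def Claim_equal_solution : Prop := ∀ (numbers : List Int), Dom_solution numbers → Spec_solution numbers (solution numbers)

-- ===== LEMMAS AND PROOFS =====

-- A's first loop is a foldl of max
lemma solnFold1_eq_foldl_max (numbers : List Int) :
    solnFold1 numbers = numbers.foldl max 0 := by
  unfold solnFold1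
  have h : (fun (m n : Int) => if n ≥ m then n else m) = max := by
    funext m n; simp [max_def]
  rw [h]

lemma foldl_max_perm {xs ys : List Int} (h : xs.Perm ys) (c : Int) :
    xs.foldl max c = ys.foldl max c := by
  induction h generalizing c with
  | nil => rfl
  | cons x _ ih => simpa using ih (max c x)
  | swap a b l =>
      simp only [List.foldl_cons]
      rw [max_right_comm]
  | trans _ _ ih1 ih2 => rw [ih1, ih2]

lemma foldl_max_dominated {t : List Int} {a : Int} (h : ∀ y ∈ t, y ≤ a) :
    t.foldl max a = a := by
  induction t with
  | nil => rfl
  | cons y t ih =>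
      simp only [List.foldl_cons]
      rw [max_eq_left (h y (by simp))]
      exact ih (fun z hz => h z (by simp [hz]))

-- second loop with count already 0: a plain max fold
lemma solnFold2_count0 (m : Int) (xs : List Int) (v : Int) :
    xs.foldl (fun st number =>
      if number = m ∧ st.2 = 1 then (st.1, st.2 - 1)
      else if number ≥ st.1 then (number, st.2)
      else st) (v, (0 : Int)) = (xs.foldl max v, 0) := by
  induction xs generalizing v with
  | nil => rfl
  | cons n xs ih =>
      rw [List.foldl_cons]
      have hstep : (if n = m ∧ (0:Int) = 1 then ((v:Int), (0:Int) - 1)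
              else if n ≥ v then (n, (0:Int)) else (v, 0)) = (max v n, (0:Int)) := by
        split_ifs <;> simp_all [max_def]
      rw [hstep, ih, List.foldl_cons]

-- second loop with count 1: skips the first occurrence of m, max-folds the rest
lemma solnFold2_count1 (m : Int) (xs : List Int) (v : Int) :
    (xs.foldl (fun st number =>
      if number = m ∧ st.2 = 1 then (st.1, st.2 - 1)
      else if number ≥ st.1 then (number, st.2)
      else st) (v, (1 : Int))).1 = (xs.erase m).foldl max v := by
  induction xs generalizing v with
  | nil => rfl
  | cons n xs ih =>
      rw [List.foldl_cons]
      by_cases hn : n = m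
      · subst hn
        have hstep : (if n = n ∧ (1:Int) = 1 then ((v:Int), (1:Int) - 1)
                else if n ≥ v then (n, (1:Int)) else (v, 1)) = (v, (0:Int)) := by
          norm_num
        rw [hstep, List.erase_cons_head, solnFold2_count0]
      · have herase : (n :: xs).erase m = n :: xs.erase m := by
          rw [List.erase_cons_tail]
          simp [hn]
        have hstep : (if n = m ∧ (1:Int) = 1 then ((v:Int), (1:Int) - 1)
                else if n ≥ v then (n, (1:Int)) else (v, 1)) = (max v n, (1:Int)) := by
          split_ifs <;> simp_all [max_def]
        rw [hstep, herase, List.foldl_cons]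
        exact ih (max v n)

-- the head of the descending sort dominates the rest
lemma sorted_rev_head_dom {numbers : List Int} {x : Int} {t : List Int}
    (hs : PySem.List.sorted numbers (fun y => y) true = x :: t) :
    ∀ y ∈ t, y ≤ x := by
  have hp := PySem.List.sorted_pairwise_rev (xs := numbers) (key := fun y => y)
  rw [hs] at hp
  exact fun y hy => (List.pairwise_cons.mp hp).1 y hy

theorem solution_eq (numbers : List Int) : solution numbers = solution_alt numbers := by
  unfold solution solution_alt
  have hperm : (PySem.List.sorted numbers (fun y => y) true).Perm numbers :=
    PySem.List.sorted_perm ..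
  rcases hs : PySem.List.sorted numbers (fun y => y) true with _ | ⟨x, t⟩
  · -- empty sort ⇒ empty list
    have : numbers = [] := by
      have := hperm; rw [hs] at this; exact this.symm.eq_nil
    subst this; rfl
  · rw [hs] at hperm
    have hdom := sorted_rev_head_dom hs
    -- m = max 0 x
    have hm : solnFold1 numbers = max 0 x := by
      rw [solnFold1_eq_foldl_max, foldl_max_perm hperm.symm]
      simp only [List.foldl_cons]
      exact foldl_max_dominated (fun y hy => le_trans (hdom y hy) (le_max_right 0 x))
    simp only [hm]
    by_cases hx : x ≤ 0
    · -- max is 0: both products vanish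
      have : max 0 x = 0 := max_eq_left hx
      rw [this]
      cases t <;> simp
    · -- x > 0, so m = x and the second loop erases one copy of x
      rw [not_le] at hx
      have hmx : max 0 x = x := max_eq_right hx.le
      rw [hmx]
      have h2 : (solnFold2 x numbers).1 = (numbers.erase x).foldl max 0 := by
        unfold solnFold2; exact solnFold2_count1 x numbers 0
      have herase : (numbers.erase x).Perm t := by
        have : ((x :: t).erase x).Perm (numbers.erase x) := hperm.erase x
        simpa using this.symm
      rw [h2, foldl_max_perm herase]
      have hp := PySem.List.sorted_pairwise_rev (xs := numbers) (key := fun v => v)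
      rw [hs] at hp
      cases t with
      | nil => simp
      | cons y t' =>
          have hp2 := (List.pairwise_cons.mp hp).2
          have hdom2 : ∀ z ∈ t', z ≤ y := fun z hz => (List.pairwise_cons.mp hp2).1 z hz
          rw [List.foldl_cons]
          rw [foldl_max_dominated (fun z hz => le_trans (hdom2 z hz) (le_max_right 0 y))]

-- ===== VERDICT (by name: the statement is the Claim_ definition above) =====
theorem solution_spec : Claim_equal_solution := by
  intro numbers _
  unfold Spec_solution
  exact solution_eq numbers
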